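-- pv_equiv track=rewrite | github.com/rcalef/magneton | magneton/utils.py | get_chunk_idxs
-- ===== SOURCE A (Python) =====
-- def get_chunk_idxs(seq_len: int, max_len: int) -> list[tuple[int, int]]:
--     """Get indices for chunking long sequences"""
--     num_pieces = (seq_len + max_len - 1) // max_len
--     lo_size = seq_len // num_pieces
--     hi_size = lo_size + 1
--     num_hi = seq_len % num_pieces
--
--     chunk_lens = [hi_size] * num_hi + [lo_size] * (num_pieces - num_hi)
--
--     chunk_idxs = []
--     curr = 0
--     for chunk_len in chunk_lens:
--         chunk_idxs.append((curr, curr + chunk_len))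
--         curr += chunk_len
--     return chunk_idxs
-- ===== SOURCE B (Python) =====
-- def get_chunk_idxs(seq_len: int, max_len: int) -> list[tuple[int, int]]:
--     """Get indices for chunking long sequences"""
--     num_pieces = (seq_len + max_len - 1) // max_len
--     lo_size = seq_len // num_pieces
--     hi_size = lo_size + 1
--     num_hi = seq_len % num_pieces
--     out = []
--     for i in range(num_pieces):
--         start = i * lo_size + min(i, num_hi)
--         out.append((start, start + (hi_size if i < num_hi else lo_size)))
--     return out
-- ===== Notes on version B (the rewrite author's own statement) =====
-- stated objective: simpler
-- what changed: B replaces A's materialised chunk-length list and running-offset accumulator loop with direct index arithmetic: for each piece i the start is i*lo_size + min(i, num_hi), so no intermediate list and no running state.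
import Mathlib
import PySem

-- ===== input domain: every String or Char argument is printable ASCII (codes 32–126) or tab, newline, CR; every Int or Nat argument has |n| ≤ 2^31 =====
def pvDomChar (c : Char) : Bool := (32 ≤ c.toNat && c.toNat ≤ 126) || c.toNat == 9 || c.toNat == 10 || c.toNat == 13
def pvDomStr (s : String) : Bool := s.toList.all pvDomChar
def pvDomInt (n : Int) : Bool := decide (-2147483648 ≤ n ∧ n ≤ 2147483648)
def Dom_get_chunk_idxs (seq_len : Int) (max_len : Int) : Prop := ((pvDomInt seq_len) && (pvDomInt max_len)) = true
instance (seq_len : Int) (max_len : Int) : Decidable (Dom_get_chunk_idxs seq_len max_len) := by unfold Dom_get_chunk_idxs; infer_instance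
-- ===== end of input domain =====

-- B computes each chunk's start by index arithmetic (i*lo_size + min i num_hi) instead of
-- A's intermediate chunk-length list and running-offset accumulator loop; same values everywhere A returns.

-- ===== PORT A =====
-- loop body of A's 'for chunk_len in chunk_lens' (state = (chunk_idxs, curr))
def pvStepA (st : List (Int × Int) × Int) (c : Int) : List (Int × Int) × Int :=
  (st.1 ++ [(st.2, st.2 + c)], st.2 + c)

def get_chunk_idxs (seq_len : Int) (max_len : Int) : List (Int × Int) :=
  let num_pieces := PySem.Int.floordiv (seq_len + max_len - 1) max_len
  let lo_size := PySem.Int.floordiv seq_len num_pieces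
  let hi_size := lo_size + 1
  let num_hi := PySem.Int.mod seq_len num_pieces
  let chunk_lens := List.replicate num_hi.toNat hi_size
      ++ List.replicate (num_pieces - num_hi).toNat lo_size
  (chunk_lens.foldl pvStepA ([], 0)).1

-- ===== PORT B =====
def get_chunk_idxs_alt (seq_len : Int) (max_len : Int) : List (Int × Int) :=
  let num_pieces := PySem.Int.floordiv (seq_len + max_len - 1) max_len
  let lo_size := PySem.Int.floordiv seq_len num_pieces
  let hi_size := lo_size + 1
  let num_hi := PySem.Int.mod seq_len num_pieces
  (PySem.List.pyRange 0 num_pieces 1).map (fun i =>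
    let start := i * lo_size + min i num_hi
    (start, start + (if i < num_hi then hi_size else lo_size)))

-- ===== PRECONDITION & SPEC =====
-- A raises ZeroDivisionError when max_len = 0, or when num_pieces = (seq_len+max_len-1)//max_len = 0
-- (e.g. seq_len = 0 with max_len > 0); exactly those inputs are excluded.
def Pre_get_chunk_idxs (seq_len : Int) (max_len : Int) : Prop :=
  max_len ≠ 0 ∧ PySem.Int.floordiv (seq_len + max_len - 1) max_len ≠ 0
instance (seq_len : Int) (max_len : Int) : Decidable (Pre_get_chunk_idxs seq_len max_len) := by unfold Pre_get_chunk_idxs; infer_instance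

def pvWitness_get_chunk_idxs : Int × Int := (10, 3)

def Spec_get_chunk_idxs (seq_len : Int) (max_len : Int) (out : List (Int × Int)) : Prop := out = get_chunk_idxs_alt seq_len max_len
instance (seq_len : Int) (max_len : Int) (out : List (Int × Int)) : Decidable (Spec_get_chunk_idxs seq_len max_len out) := by unfold Spec_get_chunk_idxs; infer_instance

-- ===== CLAIM (what is proved, stated in full; the proofs are below) =====
def Claim_equal_get_chunk_idxs : Prop := ∀ (seq_len : Int) (max_len : Int), Dom_get_chunk_idxs seq_len max_len → Pre_get_chunk_idxs seq_len max_len → Spec_get_chunk_idxs seq_len max_len (get_chunk_idxs seq_len max_len)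

-- ===== LEMMAS AND PROOFS =====

-- A's accumulator loop over a block of k equal chunk lengths, in closed form.
lemma pvFoldl_replicate (k : Nat) (c : Int) (rest : List Int) (acc : List (Int × Int)) (curr : Int) :
    (List.replicate k c ++ rest).foldl pvStepA (acc, curr)
      = rest.foldl pvStepA
          (acc ++ (List.range k).map (fun j : Nat => (curr + (j : Int) * c, curr + (j : Int) * c + c)), curr + (k : Int) * c) := by
  induction k generalizing acc curr with
  | zero => simp
  | succ k ih =>
      rw [List.replicate_succ, List.cons_append, List.foldl_cons]
      show (List.replicate k c ++ rest).foldl pvStepA (acc ++ [(curr, curr + c)], curr + c) = _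
      rw [ih]
      congr 1
      · rw [List.range_succ_eq_map, List.map_cons, List.map_map, List.append_assoc,
            List.singleton_append]
        simp only [Prod.mk.injEq]
        refine ⟨congrArg (acc ++ ·) (List.cons_eq_cons.mpr ⟨by norm_num, ?_⟩), by push_cast; ring⟩
        refine List.map_congr_left fun j _ => ?_
        simp only [Function.comp_apply, Prod.mk.injEq]
        constructor <;> (push_cast; ring)

-- equality of the two programs' cores, for a positive piece count
lemma pvMain (np lo nh : Int) (hpos : 0 < np) (h0 : 0 ≤ nh) (hlt : nh < np) :
    ((List.replicate nh.toNat (lo + 1) ++ List.replicate (np - nh).toNat lo).foldl pvStepA ([], 0)).1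
      = (PySem.List.pyRange 0 np 1).map (fun i =>
          (i * lo + min i nh, i * lo + min i nh + if i < nh then lo + 1 else lo)) := by
  have hcast_nh : (nh.toNat : Int) = nh := Int.toNat_of_nonneg h0
  have hsplit : np.toNat = nh.toNat + (np - nh).toNat := by omega
  rw [← List.append_nil (List.replicate (np - nh).toNat lo), ← List.append_assoc,
      List.append_assoc, pvFoldl_replicate, pvFoldl_replicate, List.foldl_nil]
  simp only [List.nil_append]
  rw [PySem.List.pyRange_one 0 np]
  simp only [Int.sub_zero]
  rw [hsplit, List.range_add]
  simp only [List.map_append, List.map_map]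
  congr 1
  · refine List.map_congr_left fun j hj => ?_
    have hjlt : (j : Int) < nh := by rw [List.mem_range] at hj; omega
    simp only [Function.comp_apply, Prod.mk.injEq, zero_add]
    rw [min_eq_left (le_of_lt hjlt), if_pos hjlt]
    constructor <;> ring
  · refine List.map_congr_left fun j _ => ?_
    simp only [Function.comp_apply, Prod.mk.injEq, zero_add]
    have hge : nh ≤ ((nh.toNat + j : Nat) : Int) := by push_cast; omega
    rw [min_eq_right hge, if_neg (by push_cast at hge ⊢; omega)]
    constructor <;> (push_cast [hcast_nh]; ring)

-- ===== VERDICT (by name: the statement is the Claim_ definition above) =====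
theorem get_chunk_idxs_spec : Claim_equal_get_chunk_idxs := by
  intro seq_len max_len _ hpre
  obtain ⟨hml, hnp⟩ := hpre
  unfold Spec_get_chunk_idxs get_chunk_idxs get_chunk_idxs_alt
  simp only []
  rcases lt_or_gt_of_ne hnp with hneg | hpos
  · -- num_pieces < 0 : both sides are []
    have hb := PySem.Int.mod_neg_bounds (a := seq_len)
      (b := PySem.Int.floordiv (seq_len + max_len - 1) max_len) hneg
    have h1 : (PySem.Int.mod seq_len (PySem.Int.floordiv (seq_len + max_len - 1) max_len)).toNat = 0 := by omega
    have h2 : (PySem.Int.floordiv (seq_len + max_len - 1) max_len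
        - PySem.Int.mod seq_len (PySem.Int.floordiv (seq_len + max_len - 1) max_len)).toNat = 0 := by omega
    rw [h1, h2, PySem.List.pyRange_one_eq_nil (by omega)]
    simp
  · exact pvMain _ _ _ hpos (PySem.Int.mod_nonneg _ hpos) (PySem.Int.mod_lt _ hpos)
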